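-- pv_equiv track=rewrite | github.com/mrherman0711-spec/Floux-project | execution/check_availability.py | _pick_available_staff
-- ===== SOURCE A (Python) =====
-- def _pick_available_staff(eligible: list, slot_iso: str, booked_by_staff: dict):
--     """
--     Return the least-busy eligible staff member not already booked at slot_iso.
--     Uses round-robin by workload count to distribute evenly across the team.
--     Always assigns someone — if preferred is busy, falls back to next available.
--     """
--     slot_key = slot_iso[:16]  # "YYYY-MM-DDTHH:MM"
--
--     # Sort eligible by number of already-booked future slots (ascending = least busy first)
--     eligible_sorted = sorted(
--         eligible,
--         key=lambda name: len(booked_by_staff.get(name, []))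
--     )
--
--     for name in eligible_sorted:
--         if slot_key not in booked_by_staff.get(name, []):
--             return name
--
--     # All specific eligible staff busy at this slot — return least busy as fallback
--     return eligible_sorted[0] if eligible_sorted else None
-- ===== SOURCE B (Python) =====
-- def _pick_available_staff(eligible: list, slot_iso: str, booked_by_staff: dict):
--     """Single pass: track least-busy available and least-busy overall candidates."""
--     slot_key = slot_iso[:16]
--     best_avail = None   # (workload, name) of least-busy staffer free at slot_key
--     best_all = None     # (workload, name) of least-busy staffer overall
--     for name in eligible:
--         booked = booked_by_staff.get(name, [])
--         w = len(booked)
--         if best_all is None or w < best_all[0]: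
--             best_all = (w, name)
--         if slot_key not in booked and (best_avail is None or w < best_avail[0]):
--             best_avail = (w, name)
--     if best_avail is not None:
--         return best_avail[1]
--     return best_all[1] if best_all is not None else None
-- ===== Notes on version B (the rewrite author's own statement) =====
-- stated objective: alternative
-- what changed: Replaces sort-then-scan (stable sort by workload, then first not-booked, else head) by a single pass that tracks two running minima: the least-busy available staffer and the least-busy staffer overall, with strict '<' reproducing the stable tie-break.
import Mathlib
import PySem

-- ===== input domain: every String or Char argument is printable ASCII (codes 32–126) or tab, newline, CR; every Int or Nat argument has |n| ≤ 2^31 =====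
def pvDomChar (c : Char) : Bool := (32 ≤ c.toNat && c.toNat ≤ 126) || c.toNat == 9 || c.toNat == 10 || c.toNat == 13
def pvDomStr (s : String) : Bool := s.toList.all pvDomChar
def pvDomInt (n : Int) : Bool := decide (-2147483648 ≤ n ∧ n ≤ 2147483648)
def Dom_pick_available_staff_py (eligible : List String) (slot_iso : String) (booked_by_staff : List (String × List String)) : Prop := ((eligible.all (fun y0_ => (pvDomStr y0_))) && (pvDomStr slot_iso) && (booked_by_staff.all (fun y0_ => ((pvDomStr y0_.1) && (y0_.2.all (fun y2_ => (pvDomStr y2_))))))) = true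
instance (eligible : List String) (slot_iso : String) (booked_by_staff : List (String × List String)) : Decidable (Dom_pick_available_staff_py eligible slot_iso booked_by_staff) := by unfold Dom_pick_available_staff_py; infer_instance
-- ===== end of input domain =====

-- B replaces A's sort-then-scan by one pass tracking two running minima (least-busy
-- available, least-busy overall); same return value, proved equivalent below.

-- booked_by_staff.get(name, []) : the dict is an association list, first match wins
def pvLookup (b : List (String × List String)) (n : String) : List String :=
  ((b.find? (fun kv => kv.1 == n)).map Prod.snd).getD []

-- ===== PORT A =====
def pick_available_staff_py (eligible : List String) (slot_iso : String) (booked_by_staff : List (String × List String)) : Option String :=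
  -- slot_key = slot_iso[:16]  (Python slice clamps; exact as take 16 of the chars)
  let slot_key := String.ofList (slot_iso.toList.take 16)
  -- eligible_sorted = sorted(eligible, key=lambda name: len(booked_by_staff.get(name, [])))
  let eligible_sorted := PySem.List.sorted eligible (fun name => (pvLookup booked_by_staff name).length) false
  -- for name in eligible_sorted: if slot_key not in …: return name
  match eligible_sorted.find? (fun name => !((pvLookup booked_by_staff name).contains slot_key)) with
  | some name => some name
  -- return eligible_sorted[0] if eligible_sorted else None
  | none => eligible_sorted.head?

-- ===== PORT B =====
-- loop body of B's single pass: st = (best_avail, best_all), each Option (workload, name)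
def pvStepB (booked_by_staff : List (String × List String)) (slot_key : String)
    (st : Option (Nat × String) × Option (Nat × String)) (name : String) :
    Option (Nat × String) × Option (Nat × String) :=
  let booked := pvLookup booked_by_staff name
  let w := booked.length
  let bestAll :=
    match st.2 with
    | none => some (w, name)
    | some (bw, bn) => if w < bw then some (w, name) else some (bw, bn)
  let bestAvail :=
    if !(booked.contains slot_key) then
      match st.1 with
      | none => some (w, name)
      | some (aw, an) => if w < aw then some (w, name) else some (aw, an)
    else st.1
  (bestAvail, bestAll)

def pick_available_staff_py_alt (eligible : List String) (slot_iso : String) (booked_by_staff : List (String × List String)) : Option String :=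
  let slot_key := String.ofList (slot_iso.toList.take 16)
  let st := eligible.foldl (pvStepB booked_by_staff slot_key) (none, none)
  match st.1 with
  | some (_, name) => some name
  | none => st.2.map Prod.snd

-- ===== PRECONDITION & SPEC =====
def Spec_pick_available_staff_py (eligible : List String) (slot_iso : String) (booked_by_staff : List (String × List String)) (out : Option String) : Prop := out = pick_available_staff_py_alt eligible slot_iso booked_by_staff
instance (eligible : List String) (slot_iso : String) (booked_by_staff : List (String × List String)) (out : Option String) : Decidable (Spec_pick_available_staff_py eligible slot_iso booked_by_staff out) := by unfold Spec_pick_available_staff_py; infer_instance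

-- ===== CLAIM (what is proved, stated in full; the proofs are below) =====
def Claim_equal_pick_available_staff_py : Prop := ∀ (eligible : List String) (slot_iso : String) (booked_by_staff : List (String × List String)), Dom_pick_available_staff_py eligible slot_iso booked_by_staff → Spec_pick_available_staff_py eligible slot_iso booked_by_staff (pick_available_staff_py eligible slot_iso booked_by_staff)

-- ===== LEMMAS AND PROOFS =====

-- running-minimum step on names only ("first minimum wins" via strict <)
def pvMF {α : Type} (key : α → Nat) : Option α → α → Option α :=
  fun acc n => match acc with
    | none => some n
    | some m => if key n < key m then some n else acc

-- B's step on (workload, name) pairs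
def pvG {α : Type} (key : α → Nat) : Option (Nat × α) → α → Option (Nat × α) :=
  fun st n => match st with
    | none => some (key n, n)
    | some (bw, bn) => if key n < bw then some (key n, n) else some (bw, bn)

theorem pvG_eq_mf_map {α : Type} (key : α → Nat) (xs : List α) (acc : Option α) :
    xs.foldl (pvG key) (acc.map (fun m => (key m, m))) =
      (xs.foldl (pvMF key) acc).map (fun m => (key m, m)) := by
  induction xs generalizing acc with
  | nil => rfl
  | cons n xs ih =>
    have h : pvG key (acc.map (fun m => (key m, m))) n =
        (pvMF key acc n).map (fun m => (key m, m)) := by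
      cases acc with
      | none => rfl
      | some m => simp only [pvG, pvMF, Option.map_some]; split_ifs <;> rfl
    simpa [List.foldl_cons, h] using ih (pvMF key acc n)

theorem pv_insertBy_eq_cons {α : Type} (before : α → α → Bool) (x : α) (l : List α)
    (h : ∀ z ∈ l, before x z = true) :
    PySem.List.insertBy before x l = x :: l := by
  cases l with
  | nil => rfl
  | cons z zs => simp [PySem.List.insertBy, h z (List.mem_cons_self ..)]

theorem pv_head?_insertBy {α : Type} (before : α → α → Bool) (x : α) (l : List α) :
    (PySem.List.insertBy before x l).head? =
      some (match l.head? with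
            | none => x
            | some y => if before x y then x else y) := by
  cases l with
  | nil => rfl
  | cons y ys =>
    simp only [PySem.List.insertBy, List.head?_cons]
    split_ifs <;> simp

theorem pv_filter_insertBy {α : Type} (key : α → Nat) (p : α → Bool) (x : α) (l : List α)
    (h : l.Pairwise (fun a b => key a ≤ key b)) :
    (PySem.List.insertBy (fun a b => decide (key a < key b)) x l).filter p =
      if p x then PySem.List.insertBy (fun a b => decide (key a < key b)) x (l.filter p)
      else l.filter p := by
  induction l with
  | nil => split_ifs with hpx <;> simp [PySem.List.insertBy, hpx]
  | cons y ys ih =>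
    have hpw := (List.pairwise_cons.mp h).1
    have htl := (List.pairwise_cons.mp h).2
    by_cases hxy : key x < key y
    · have hstep : PySem.List.insertBy (fun a b => decide (key a < key b)) x (y :: ys)
          = x :: y :: ys := by simp [PySem.List.insertBy, hxy]
      rw [hstep]
      by_cases hpx : p x
      · have hcons : PySem.List.insertBy (fun a b => decide (key a < key b)) x ((y :: ys).filter p)
            = x :: (y :: ys).filter p := by
          apply pv_insertBy_eq_cons
          intro z hz
          have hzmem' : z ∈ y :: ys := List.mem_of_mem_filter hz
          have : key y ≤ key z := by
            rcases List.mem_cons.mp hzmem' with rfl | hzys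
            · exact le_refl _
            · exact hpw z hzys
          simp; omega
        simp [hpx, hcons]
      · simp [hpx]
    · have hstep : PySem.List.insertBy (fun a b => decide (key a < key b)) x (y :: ys)
          = y :: PySem.List.insertBy (fun a b => decide (key a < key b)) x ys := by
        simp [PySem.List.insertBy, hxy]
      rw [hstep]
      by_cases hpy : p y
      · by_cases hpx : p x
        · have h2 : PySem.List.insertBy (fun a b => decide (key a < key b)) x (y :: ys.filter p)
              = y :: PySem.List.insertBy (fun a b => decide (key a < key b)) x (ys.filter p) := by
            simp [PySem.List.insertBy, hxy]
          simp [hpy, hpx, h2, ih htl]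
        · simp [hpy, hpx, ih htl]
      · simp [hpy, ih htl]

theorem pv_sorted_append_singleton {α : Type} (key : α → Nat) (xs : List α) (x : α) :
    PySem.List.sorted (xs ++ [x]) key false =
      PySem.List.insertBy (fun a b => decide (key a < key b)) x (PySem.List.sorted xs key false) := by
  rw [PySem.List.sorted_eq_foldl_insertBy, PySem.List.sorted_eq_foldl_insertBy, List.foldl_append]
  rfl

theorem pv_head?_sorted {α : Type} (key : α → Nat) (xs : List α) :
    (PySem.List.sorted xs key false).head? = xs.foldl (pvMF key) none := by
  induction xs using List.reverseRecOn with
  | nil => rfl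
  | append_singleton xs x ih =>
    rw [pv_sorted_append_singleton, pv_head?_insertBy, List.foldl_append, List.foldl_cons,
      List.foldl_nil, ih]
    cases hxs : xs.foldl (pvMF key) none with
    | none => rfl
    | some m => simp only [pvMF]; split_ifs <;> simp_all

theorem pv_filter_sorted {α : Type} (key : α → Nat) (p : α → Bool) (xs : List α) :
    (PySem.List.sorted xs key false).filter p = PySem.List.sorted (xs.filter p) key false := by
  induction xs using List.reverseRecOn with
  | nil => rfl
  | append_singleton xs x ih =>
    rw [pv_sorted_append_singleton,
      pv_filter_insertBy key p x _ (PySem.List.sorted_pairwise xs key), ih, List.filter_append]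
    by_cases hpx : p x
    · simp [hpx, pv_sorted_append_singleton]
    · simp [hpx]

theorem pv_find?_eq_head?_filter {α : Type} (p : α → Bool) (l : List α) :
    l.find? p = (l.filter p).head? := by
  induction l with
  | nil => rfl
  | cons y ys ih =>
    cases hpy : p y
    · simp only [List.find?_cons, List.filter_cons, hpy, Bool.false_eq_true, if_false, ih]
    · simp only [List.find?_cons, List.filter_cons, hpy, if_true, List.head?_cons]

-- B's paired fold splits into two independent component folds
theorem pv_foldl_pair {α : Type} (key : α → Nat) (p : α → Bool) (xs : List α)
    (s : Option (Nat × α) × Option (Nat × α)) :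
    xs.foldl (fun st n => (if p n then pvG key st.1 n else st.1, pvG key st.2 n)) s =
      (xs.foldl (fun a n => if p n then pvG key a n else a) s.1, xs.foldl (pvG key) s.2) := by
  induction xs generalizing s with
  | nil => rfl
  | cons n xs ih => simp [List.foldl_cons, ih]

theorem pick_available_staff_py_eq (eligible : List String) (slot_iso : String)
    (booked_by_staff : List (String × List String)) :
    pick_available_staff_py eligible slot_iso booked_by_staff =
      pick_available_staff_py_alt eligible slot_iso booked_by_staff := by
  unfold pick_available_staff_py pick_available_staff_py_alt
  dsimp only
  set slot_key := String.ofList (slot_iso.toList.take 16) with hsk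
  set key : String → Nat := fun name => (pvLookup booked_by_staff name).length with hkey
  set p : String → Bool := fun name => !((pvLookup booked_by_staff name).contains slot_key) with hp
  -- B's step is exactly the paired (pvG, filtered pvG) step
  have hstep : pvStepB booked_by_staff slot_key =
      (fun st n => (if p n then pvG key st.1 n else st.1, pvG key st.2 n)) := by
    funext st n
    cases st with
    | mk a b =>
      cases a <;> cases b <;> simp only [pvStepB, pvG, hkey, hp]
  rw [hstep, pv_foldl_pair key p eligible (none, none)]
  rw [← List.foldl_filter (f := pvG key) (p := p) (l := eligible) (init := none)]
  have hA : (PySem.List.sorted eligible key false).find? p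
      = (eligible.filter p).foldl (pvMF key) none := by
    rw [pv_find?_eq_head?_filter, pv_filter_sorted, pv_head?_sorted]
  have hav := pvG_eq_mf_map key (eligible.filter p) none
  have hall := pvG_eq_mf_map key eligible none
  simp only [Option.map_none] at hav hall
  rw [hA, pv_head?_sorted, hav]
  dsimp only
  rw [hall]
  cases (eligible.filter p).foldl (pvMF key) none with
  | some n => rfl
  | none =>
    cases eligible.foldl (pvMF key) none <;> rfl

-- ===== VERDICT (by name: the statement is the Claim_ definition above) =====
theorem pick_available_staff_py_spec : Claim_equal_pick_available_staff_py := by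
  intro eligible slot_iso booked_by_staff _
  unfold Spec_pick_available_staff_py
  exact pick_available_staff_py_eq eligible slot_iso booked_by_staff
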